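-- pv_equiv track=rewrite | github.com/Arsenho/2D-Sequence-Alignment | utils.py | ir_matrice_func
-- ===== SOURCE A (Python) =====
-- def ins_func(char):
--     return 1
--
-- def ir_matrice_func(y):
--     motif = y
--     assert isinstance(motif, list)
--     assert isinstance(motif[0], str)
--
--     ir_matrix = []
--
--     row = len(motif)
--     column = len(motif[0])
--
--     # Initializing the scores list
--     for i in range(row):
--         inter = []
--         for j in range(column):
--             inter.append(0)
--
--         ir_matrix.append(inter)
--
--     for i in range(0, row):
--         for j in range(0, column):
--             step = 0
--             for p in range(j):
--                 substring = motif[i][p]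
--                 step += ins_func(substring)
--             ir_matrix[i][j] = step
--
--     return ir_matrix
-- ===== SOURCE B (Python) =====
-- def ir_matrice_func(y):
--     assert isinstance(y, list)
--     assert isinstance(y[0], str)
--     return [list(range(len(y[0]))) for _ in y]
-- ===== Notes on version B (the rewrite author's own statement) =====
-- stated objective: faster
-- what changed: Since ins_func always returns 1, cell[i][j] is just j; B emits list(range(column)) per row instead of A's triple nested accumulation loops.
import Mathlib
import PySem

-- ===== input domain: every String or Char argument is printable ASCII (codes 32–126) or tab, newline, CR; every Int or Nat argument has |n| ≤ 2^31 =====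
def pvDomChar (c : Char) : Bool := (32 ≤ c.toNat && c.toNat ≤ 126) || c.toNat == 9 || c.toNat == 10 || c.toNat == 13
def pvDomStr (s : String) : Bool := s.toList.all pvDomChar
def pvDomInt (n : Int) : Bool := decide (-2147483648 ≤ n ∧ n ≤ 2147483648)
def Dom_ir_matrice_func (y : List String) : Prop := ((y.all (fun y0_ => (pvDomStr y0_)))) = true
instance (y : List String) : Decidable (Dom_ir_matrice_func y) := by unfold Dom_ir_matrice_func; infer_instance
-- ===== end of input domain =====

-- B replaces A's triple nested loop (which re-counts j characters with ins_func ≡ 1 for every cell)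
-- by one range(column) per row: asymptotically faster, same return value wherever A returns.

-- ===== PORT A =====
def ins_func (_char : Option Char) : Int := 1

def ir_matrice_func (y : List String) : List (List Int) :=
  let motif := y
  let row := motif.length
  let column := ((PySem.List.pyGet? motif 0).getD "").length
  -- the zero-initialised matrix is fully overwritten entry by entry; each entry is A's inner p-loop
  (List.range row).map (fun (i : Nat) =>
    (List.range column).map (fun (j : Nat) =>
      (List.range j).foldl (fun (step : Int) (p : Nat) =>
        step + ins_func (PySem.Str.pyGet? ((PySem.List.pyGet? motif (i : Int)).getD "") (p : Int))) 0))

-- ===== PORT B =====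
def ir_matrice_func_alt (y : List String) : List (List Int) :=
  y.map (fun _ => (List.range ((PySem.List.pyGet? y 0).getD "").length).map (fun (j : Nat) => (j : Int)))

-- ===== PRECONDITION & SPEC =====
-- Pre_ excludes the empty list (both Pythons raise on y[0]) and lists whose first string is more
-- than one longer than some other string, on which A raises IndexError at motif[i][p].
def Pre_ir_matrice_func (y : List String) : Prop :=
  y ≠ [] ∧ ∀ s ∈ y, (y.headD "").length ≤ s.length + 1
instance (y : List String) : Decidable (Pre_ir_matrice_func y) := by unfold Pre_ir_matrice_func; infer_instance
def pvWitness_ir_matrice_func : List String := ["abc", "xy", "wxyz"]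

def Spec_ir_matrice_func (y : List String) (out : List (List Int)) : Prop := out = ir_matrice_func_alt y
instance (y : List String) (out : List (List Int)) : Decidable (Spec_ir_matrice_func y out) := by unfold Spec_ir_matrice_func; infer_instance

-- ===== CLAIM (what is proved, stated in full; the proofs are below) =====
def Claim_equal_ir_matrice_func : Prop := ∀ (y : List String), Dom_ir_matrice_func y → Pre_ir_matrice_func y → Spec_ir_matrice_func y (ir_matrice_func y)

-- ===== LEMMAS AND PROOFS =====

theorem pv_count (n : Nat) (c : Int) :
    (List.range n).foldl (fun (s : Int) (_ : Nat) => s + 1) c = c + n := by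
  induction n with
  | zero => simp
  | succ m ih => simp [List.range_succ, ih]; ring

-- A's inner p-loop sums ins_func ≡ 1 over range j, so it computes j.
theorem pv_step_loop (f : Nat → Option Char) (j : Nat) :
    (List.range j).foldl (fun (step : Int) (p : Nat) => step + ins_func (f p)) 0 = (j : Int) := by
  simp only [ins_func]
  simpa using pv_count j 0

theorem pv_map_const {α β : Type} (l : List α) (b : β) :
    l.map (fun _ => b) = List.replicate l.length b := by
  induction l with
  | nil => rfl
  | cons x xs ih => simp [List.replicate_succ, ih]

-- ===== VERDICT (by name: the statement is the Claim_ definition above) =====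
theorem ir_matrice_func_spec : Claim_equal_ir_matrice_func := by
  intro y _ _
  unfold Spec_ir_matrice_func ir_matrice_func ir_matrice_func_alt
  simp only
  refine (List.map_congr_left (fun i _ => List.map_congr_left (fun j _ => pv_step_loop _ j))).trans ?_
  rw [pv_map_const, pv_map_const, List.length_range]
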